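-- pv_equiv track=rewrite | github.com/yaitaissa/PIE_2024_Station_Meteo | data_analysis/file_reading.py | fuze_dict
-- ===== SOURCE A (Python) =====
-- def fuze_dict(list_dict:list[dict], nb_values:int, nb_dict:int):
--     list_values = []
--
--     for i in range(nb_values):
--         dict_values = {}
--
--         for j in range(nb_dict):
--             dict = list_dict[j]
--
--             for date in dict:
--                 if date not in dict_values:
--                     dict_values[date] = {}
--
--                 dict_values[date][j] = dict[date][i]
--
--         list_values.append(dict_values)
--
--     return list_values
-- ===== SOURCE B (Python) =====
-- def fuze_dict(list_dict: list[dict], nb_values: int, nb_dict: int):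
--     # Stage 1: build an inverted index in one grouping pass: date -> ordered
--     # list of (j, values) entries, over the first nb_dict input dicts.
--     by_date = {}
--     for j, d in enumerate(list_dict[:max(nb_dict, 0)]):
--         for date, vals in d.items():
--             by_date.setdefault(date, []).append((j, vals))
--     # Stage 2: read each per-value-index output dict off the index by comprehension.
--     return [{date: {j: vals[i] for j, vals in entries}
--              for date, entries in by_date.items()}
--             for i in range(nb_values)]
-- ===== Notes on version B (the rewrite author's own statement) =====
-- stated objective: alternative
-- what changed: A makes nb_values separate full scans of all input dicts, writing one output dict at a time; B instead builds an inverted index (date -> ordered list of (j, values) entries) in a single grouping pass over list_dict[:nb_dict] and then reads every per-value-index output dict off that index by comprehension.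
import Mathlib
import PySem

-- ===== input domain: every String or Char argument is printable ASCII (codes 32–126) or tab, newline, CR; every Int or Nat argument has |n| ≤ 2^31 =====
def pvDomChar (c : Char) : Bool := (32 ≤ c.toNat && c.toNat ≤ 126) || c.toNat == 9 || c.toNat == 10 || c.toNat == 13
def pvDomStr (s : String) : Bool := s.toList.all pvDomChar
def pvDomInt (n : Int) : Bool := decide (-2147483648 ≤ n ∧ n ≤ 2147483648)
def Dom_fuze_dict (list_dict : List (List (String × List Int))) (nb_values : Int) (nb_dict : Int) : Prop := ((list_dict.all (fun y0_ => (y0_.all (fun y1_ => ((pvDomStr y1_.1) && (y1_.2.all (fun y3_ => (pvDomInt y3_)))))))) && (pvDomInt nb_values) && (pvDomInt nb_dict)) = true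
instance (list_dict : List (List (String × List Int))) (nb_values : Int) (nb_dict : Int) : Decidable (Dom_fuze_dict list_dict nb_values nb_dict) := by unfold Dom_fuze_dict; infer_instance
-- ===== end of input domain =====

-- ===== PORT A =====
-- B replaces A's nb_values full scans of the input with one grouping pass building an
-- inverted index (date -> [(j, values)]) that the outputs are then read off; no speed claim.

-- port of A: for each value index i (outer loop), scan all nb_dict input dicts and collect {date: {j: value}}.
def fuze_dict (list_dict : List (List (String × List Int))) (nb_values : Int) (nb_dict : Int) : List (List (String × List (Int × Int))) :=
  let r : List (PySem.Dict String (PySem.Dict Int Int)) :=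
    (PySem.List.pyRange 0 nb_values 1).foldl (fun list_values i =>
      let dict_values : PySem.Dict String (PySem.Dict Int Int) :=
        (PySem.List.pyRange 0 nb_dict 1).foldl (fun dict_values j =>
          -- dict = list_dict[j]; Pre_ guarantees j in range, so the .getD [] default is never used
          let d := PySem.Dict.ofList ((PySem.List.pyGet? list_dict j).getD [])
          d.keys.foldl (fun dict_values date =>
            let dict_values :=
              if dict_values.contains date then dict_values
              else dict_values.insert date PySem.Dict.empty
            -- dict_values[date][j] = dict[date][i]; Pre_ guarantees i in range of the value list
            dict_values.modify date PySem.Dict.empty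
              (fun m => m.insert j ((PySem.List.pyGet? (d.getD date []) i).getD 0))) dict_values)
          PySem.Dict.empty
      list_values ++ [dict_values]) []
  r.map (fun dv => dv.items.map (fun p => (p.1, p.2.items)))

-- ===== PORT B =====
-- port of B: one grouping pass over enumerate(list_dict[:max(nb_dict, 0)]) builds the inverted
-- index by_date : date -> ordered list of (j, values); then each per-value-index output dict is
-- read off the index by a map (the two comprehensions).  Python's
-- `by_date.setdefault(date, []).append((j, vals))` is exactly `Dict.modify date [] (· ++ [(j, vals)])`
-- (d[k] = d.get(k, []) + [x], inserting the key at the end when absent).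
def fuze_dict_alt (list_dict : List (List (String × List Int))) (nb_values : Int) (nb_dict : Int) : List (List (String × List (Int × Int))) :=
  let by_date : PySem.Dict String (List (Int × List Int)) :=
    (PySem.List.enumerate (PySem.List.slice list_dict none (some (max nb_dict 0)))).foldl
      (fun g jd =>
        (PySem.Dict.ofList jd.2).items.foldl
          (fun g p => g.modify p.1 [] (· ++ [(jd.1, p.2)])) g)
      PySem.Dict.empty
  (PySem.List.pyRange 0 nb_values 1).map (fun i =>
    by_date.items.map (fun q =>
      (q.1, q.2.map (fun jv => (jv.1, (PySem.List.pyGet? jv.2 i).getD 0)))))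

-- ===== PRECONDITION & SPEC =====
-- Pre_ excludes exactly the inputs on which A raises IndexError: with nb_values >= 1, either
-- nb_dict exceeds len(list_dict) (list_dict[j] raises) or some value list among the first nb_dict
-- dicts is shorter than nb_values (dict[date][i] raises).  With nb_values <= 0 A returns [] and
-- is total, so those inputs are all admitted.
def Pre_fuze_dict (list_dict : List (List (String × List Int))) (nb_values : Int) (nb_dict : Int) : Prop :=
  nb_values ≤ 0 ∨
    (nb_dict ≤ (list_dict.length : Int) ∧
      ∀ d ∈ list_dict.take nb_dict.toNat, ∀ p ∈ (PySem.Dict.ofList d).items, nb_values ≤ (p.2.length : Int))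
instance (list_dict : List (List (String × List Int))) (nb_values : Int) (nb_dict : Int) : Decidable (Pre_fuze_dict list_dict nb_values nb_dict) := by unfold Pre_fuze_dict; infer_instance
def pvWitness_fuze_dict : (List (List (String × List Int))) × Int × Int := ([[("a", [1, 2]), ("b", [3, 4])], [("a", [5, 6])]], 2, 2)

def Spec_fuze_dict (list_dict : List (List (String × List Int))) (nb_values : Int) (nb_dict : Int) (out : List (List (String × List (Int × Int)))) : Prop := out = fuze_dict_alt list_dict nb_values nb_dict
instance (list_dict : List (List (String × List Int))) (nb_values : Int) (nb_dict : Int) (out : List (List (String × List (Int × Int)))) : Decidable (Spec_fuze_dict list_dict nb_values nb_dict out) := by unfold Spec_fuze_dict; infer_instance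

-- ===== CLAIM (what is proved, stated in full; the proofs are below) =====
def Claim_equal_fuze_dict : Prop := ∀ (list_dict : List (List (String × List Int))) (nb_values : Int) (nb_dict : Int), Dom_fuze_dict list_dict nb_values nb_dict → Pre_fuze_dict list_dict nb_values nb_dict → Spec_fuze_dict list_dict nb_values nb_dict (fuze_dict list_dict nb_values nb_dict)

-- ===== LEMMAS AND PROOFS =====

-- the input dict at index j, as A reads it
def pvVals (list_dict : List (List (String × List Int))) (j : Int) : PySem.Dict String (List Int) :=
  PySem.Dict.ofList ((PySem.List.pyGet? list_dict j).getD [])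

-- the flattened stream of (date, j, values) events, in the shared traversal order
def pvEvs (list_dict : List (List (String × List Int))) (nb_dict : Int) :
    List (String × Int × List Int) :=
  (PySem.List.pyRange 0 nb_dict 1).flatMap
    (fun j => (pvVals list_dict j).items.map (fun p => (p.1, j, p.2)))

-- A's per-event update of one output dict (for value index i)
def pvStepA (i : Int) (dv : PySem.Dict String (PySem.Dict Int Int)) (e : String × Int × List Int) :
    PySem.Dict String (PySem.Dict Int Int) :=
  dv.modify e.1 PySem.Dict.empty (fun m => m.insert e.2.1 ((PySem.List.pyGet? e.2.2 i).getD 0))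

-- B's per-event update of the inverted index
def pvStepG (g : PySem.Dict String (List (Int × List Int))) (e : String × Int × List Int) :
    PySem.Dict String (List (Int × List Int)) :=
  g.modify e.1 [] (· ++ [(e.2.1, e.2.2)])

theorem pv_if_modify {ν : Type} (dv : PySem.Dict String ν) (k : String) (d0 : ν) (f : ν → ν) :
    (if dv.contains k then dv else dv.insert k d0).modify k d0 f = dv.modify k d0 f := by
  by_cases h : dv.contains k
  · simp [h]
  · have h' : dv.contains k = false := by simpa using h
    simp only [h', Bool.false_eq_true, if_false]
    show (dv.insert k d0).insert k (f ((dv.insert k d0).getD k d0))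
        = dv.insert k (f (dv.getD k d0))
    rw [PySem.Dict.getD_insert_self, PySem.Dict.insert_insert_self]
    simp [PySem.Dict.getD_of_not_contains, h']

theorem pv_foldl_flatMap {α β σ : Type} (l : List α) (h : α → List β) (f : σ → β → σ) (init : σ) :
    (l.flatMap h).foldl f init = l.foldl (fun s x => (h x).foldl f s) init := by
  induction l generalizing init with
  | nil => rfl
  | cons a l ih => simp only [List.flatMap_cons, List.foldl_append, List.foldl_cons, ih]

-- generic: getD after a modify-by-key loop = fold of the updates of the matching events
theorem pv_getD_foldl_modify {ν ε : Type} (l : List ε) (key : ε → String) (d0 : ν)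
    (upd : ε → ν → ν) (d : PySem.Dict String ν) (c : String) :
    (l.foldl (fun d e => d.modify (key e) d0 (upd e)) d).getD c d0
      = (l.filter (fun e => key e == c)).foldl (fun v e => upd e v) (d.getD c d0) := by
  induction l generalizing d with
  | nil => rfl
  | cons e l ih =>
    simp only [List.foldl_cons, List.filter_cons]
    rw [ih]
    by_cases h : key e = c
    · simp [h]
    · simp [h, PySem.Dict.getD_modify, Ne.symm h]

-- a nodup-keyed list has at most one entry filtered out per key
theorem pv_filter_key_len_le_one {ε : Type} (l : List ε) (key : ε → String) (c : String)
    (h : (l.map key).Nodup) : (l.filter (fun e => key e == c)).length ≤ 1 := by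
  induction l with
  | nil => simp
  | cons e l ih =>
    simp only [List.map_cons, List.nodup_cons] at h
    simp only [List.filter_cons]
    by_cases hk : key e = c
    · have hnil : l.filter (fun x => key x == c) = [] := by
        apply List.filter_eq_nil_iff.mpr
        intro x hx hbe
        exact h.1 (List.mem_map.mpr ⟨x, hx, by
          have hxc : key x = c := by simpa using hbe
          rw [hxc, hk]⟩)
      simp [hk, hnil]
    · simp [hk, ih h.2]

-- flatMap of per-element sublists of singletons is a sublist of the base list
theorem pv_flatMap_sublist {α : Type} (l : List α) (g : α → List α)
    (h : ∀ a ∈ l, (g a).Sublist [a]) : (l.flatMap g).Sublist l := by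
  induction l with
  | nil => simp
  | cons a l ih =>
    simp only [List.flatMap_cons]
    have := List.Sublist.append (h a (by simp)) (ih (fun b hb => h b (by simp [hb])))
    simpa using this

-- a map over a short list of a function constant on it is a sublist of the singleton
theorem pv_map_const_sublist {ε α : Type} (l : List ε) (j : α) (f : ε → α)
    (hf : ∀ e ∈ l, f e = j) (h : l.length ≤ 1) : (l.map f).Sublist [j] := by
  match l with
  | [] => simp
  | [a] => simp [hf a (by simp)]
  | a :: b :: t => simp at h

-- fresh-key insert loop read back as a map (A's inner dict for one date)
theorem pv_items_insert_fold (l : List (String × Int × List Int)) (i : Int)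
    (h : (l.map (fun e => e.2.1)).Nodup) :
    (l.foldl (fun v e => v.insert e.2.1 ((PySem.List.pyGet? e.2.2 i).getD 0))
        PySem.Dict.empty).items
      = l.map (fun e => (e.2.1, (PySem.List.pyGet? e.2.2 i).getD 0)) := by
  have := PySem.Dict.items_foldl_insert_fresh l (fun e => e.2.1)
    (fun e => (PySem.List.pyGet? e.2.2 i).getD 0) PySem.Dict.empty (fun a _ => by simp) h
  simpa using this

-- the j components of the events matching one date are distinct
theorem pv_nodup_filtered_js (list_dict : List (List (String × List Int))) (nb_dict : Int)
    (c : String) :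
    (((pvEvs list_dict nb_dict).filter (fun e => e.1 == c)).map (fun e => e.2.1)).Nodup := by
  unfold pvEvs
  rw [List.filter_flatMap, List.map_flatMap]
  have hrange : (PySem.List.pyRange 0 nb_dict 1).Nodup := by
    rw [PySem.List.pyRange_one]
    exact List.Nodup.map (fun a b hab => by omega) List.nodup_range
  refine List.Nodup.sublist (pv_flatMap_sublist _ _ ?_) hrange
  intro j hj
  rw [List.filter_map, List.map_map]
  have hnd1 : ((pvVals list_dict j).items.map (fun p => p.1)).Nodup :=
    PySem.Dict.nodup_keys_ofList _
  exact pv_map_const_sublist _ j _ (fun e _ => rfl)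
    (pv_filter_key_len_le_one (pvVals list_dict j).items (fun p => p.1) c hnd1)

-- the core: the grouped index read off at value index i equals A's fold, item for item
theorem pv_group (es : List (String × Int × List Int)) (i : Int)
    (h : ∀ c, ((es.filter (fun e => e.1 == c)).map (fun e => e.2.1)).Nodup) :
    (es.foldl (pvStepA i) PySem.Dict.empty).items.map (fun p => (p.1, p.2.items))
      = (es.foldl pvStepG PySem.Dict.empty).items.map
          (fun q => (q.1, q.2.map (fun jv => (jv.1, (PySem.List.pyGet? jv.2 i).getD 0)))) := by
  unfold pvStepA pvStepG
  have hA := PySem.Dict.keys_foldl_modify_key es (fun e => e.1) PySem.Dict.empty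
    (fun _ e => fun m => m.insert e.2.1 ((PySem.List.pyGet? e.2.2 i).getD 0))
    (PySem.Dict.empty (κ := String) (ν := PySem.Dict Int Int))
  have hG := PySem.Dict.keys_foldl_modify_key es (fun e => e.1) []
    (fun _ e => fun v => v ++ [(e.2.1, e.2.2)])
    (PySem.Dict.empty (κ := String) (ν := List (Int × List Int)))
  have hndA := PySem.Dict.nodup_keys_foldl_modify_key es (fun e => e.1) PySem.Dict.empty
    (fun _ e => fun m => m.insert e.2.1 ((PySem.List.pyGet? e.2.2 i).getD 0))
    (PySem.Dict.empty (κ := String) (ν := PySem.Dict Int Int)) (by simp)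
  have hndG := PySem.Dict.nodup_keys_foldl_modify_key es (fun e => e.1) []
    (fun _ e => fun v => v ++ [(e.2.1, e.2.2)])
    (PySem.Dict.empty (κ := String) (ν := List (Int × List Int))) (by simp)
  rw [PySem.Dict.items_eq_map_keys _ hndA PySem.Dict.empty,
    PySem.Dict.items_eq_map_keys _ hndG []]
  rw [List.map_map, List.map_map, hA, hG]
  apply List.map_congr_left
  intro c _
  simp only [Function.comp_apply]
  refine Prod.ext rfl ?_
  dsimp only
  rw [pv_getD_foldl_modify es (fun e => e.1) PySem.Dict.empty
      (fun e => fun m => m.insert e.2.1 ((PySem.List.pyGet? e.2.2 i).getD 0)) _ c,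
    pv_getD_foldl_modify es (fun e => e.1) []
      (fun e => fun v => v ++ [(e.2.1, e.2.2)]) _ c]
  simp only [PySem.Dict.getD_empty]
  rw [pv_items_insert_fold _ i (h c)]
  have hfold := PySem.List.foldl_append_singleton_eq_map
    (fun e : String × Int × List Int => (e.2.1, e.2.2)) (es.filter (fun e => e.1 == c)) []
  rw [List.nil_append] at hfold
  rw [hfold, List.map_map]
  rfl

-- A in canonical event-stream form
theorem pv_A_eq (list_dict : List (List (String × List Int))) (nb_values nb_dict : Int) :
    fuze_dict list_dict nb_values nb_dict
      = (PySem.List.pyRange 0 nb_values 1).map (fun i =>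
          ((pvEvs list_dict nb_dict).foldl (pvStepA i) PySem.Dict.empty).items.map
            (fun p => (p.1, p.2.items))) := by
  unfold fuze_dict
  dsimp only
  rw [PySem.List.foldl_append_singleton_eq_map, List.nil_append, List.map_map]
  apply List.map_congr_left
  intro i _
  simp only [Function.comp_apply]
  congr 2
  unfold pvEvs
  rw [pv_foldl_flatMap]
  apply PySem.List.foldl_congr_mem
  intro dv j _
  rw [List.foldl_map]
  show ((pvVals list_dict j).items.map (fun p => p.1)).foldl _ dv = _
  rw [List.foldl_map]
  apply PySem.List.foldl_congr_mem
  intro acc p hp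
  dsimp only
  rw [pv_if_modify]
  unfold pvStepA
  dsimp only
  have hv : (PySem.Dict.ofList ((PySem.List.pyGet? list_dict j).getD [])).getD p.1 []
      = p.2 := PySem.Dict.getD_of_mem_items _ hp (PySem.Dict.nodup_keys_ofList _) []
  rw [hv]

-- B in canonical event-stream form
theorem pv_B_eq (list_dict : List (List (String × List Int))) (nb_values nb_dict : Int) :
    fuze_dict_alt list_dict nb_values nb_dict
      = (PySem.List.pyRange 0 nb_values 1).map (fun i =>
          ((pvEvs list_dict nb_dict).foldl pvStepG PySem.Dict.empty).items.map
            (fun q => (q.1, q.2.map (fun jv => (jv.1, (PySem.List.pyGet? jv.2 i).getD 0))))) := by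
  have hby : (PySem.List.enumerate (PySem.List.slice list_dict none (some (max nb_dict 0)))).foldl
      (fun g jd =>
        (PySem.Dict.ofList jd.2).items.foldl
          (fun g p => g.modify p.1 [] (· ++ [(jd.1, p.2)])) g)
      PySem.Dict.empty
      = (pvEvs list_dict nb_dict).foldl pvStepG PySem.Dict.empty := by
    have hmax : (max nb_dict 0) = ((nb_dict.toNat : Int)) := by omega
    rw [hmax, PySem.List.slice_to_natCast]
    rw [PySem.List.enumerate_eq_map_pyRange (xs := list_dict.take nb_dict.toNat)
      ([] : List (String × List Int))]
    rw [List.foldl_map]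
    unfold pvEvs
    rw [pv_foldl_flatMap]
    have hlen : PySem.List.len (list_dict.take nb_dict.toNat)
        = ((min nb_dict.toNat list_dict.length : Nat) : Int) := by
      simp [PySem.List.len_eq]
    rw [hlen]
    have hsplit : PySem.List.pyRange 0 nb_dict 1
        = PySem.List.pyRange 0 ((min nb_dict.toNat list_dict.length : Nat) : Int) 1
          ++ PySem.List.pyRange ((min nb_dict.toNat list_dict.length : Nat) : Int) nb_dict 1 := by
      by_cases hnd : 0 ≤ nb_dict
      · exact PySem.List.pyRange_one_append 0 _ nb_dict (by omega) (by omega)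
      · have h0 : ((min nb_dict.toNat list_dict.length : Nat) : Int) = 0 := by omega
        rw [h0]
        have he : PySem.List.pyRange (0:Int) (0:Int) 1 = [] := by
          rw [PySem.List.pyRange_one]; simp
        rw [he, List.nil_append]
    rw [hsplit, List.foldl_append]
    have htail : ∀ (g : PySem.Dict String (List (Int × List Int))),
        (PySem.List.pyRange ((min nb_dict.toNat list_dict.length : Nat) : Int) nb_dict 1).foldl
          (fun s j => ((pvVals list_dict j).items.map (fun p => (p.1, j, p.2))).foldl pvStepG s)
          g = g := by
      intro g
      rw [PySem.List.foldl_congr_mem _ _ (fun s _ => s) g ?_]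
      · exact List.foldl_fixed _
      · intro acc j hj
        rw [PySem.List.mem_pyRange_one] at hj
        have hnone : PySem.List.pyGet? list_dict j = none := by
          rw [PySem.List.pyGet?_eq_none_iff]; unfold PySem.Raise.InRange; omega
        dsimp only
        unfold pvVals
        rw [hnone]
        have hi : (PySem.Dict.ofList ([] : List (String × List Int))).items
            = ([] : List (String × List Int)) := rfl
        simp [hi]
    rw [htail]
    apply PySem.List.foldl_congr_mem
    intro g j hj
    rw [PySem.List.mem_pyRange_one] at hj
    dsimp only
    rw [List.foldl_map]
    have htake : PySem.List.pyGetD (list_dict.take nb_dict.toNat) j []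
        = (PySem.List.pyGet? list_dict j).getD [] := by
      have h1 : 0 ≤ j := hj.1
      have h2 : j < ((list_dict.take nb_dict.toNat).length : Int) := by
        simp only [List.length_take]; omega
      have h3 : j < (list_dict.length : Int) := by
        simp only [List.length_take] at h2; omega
      rw [PySem.List.pyGetD_eq_getElem _ _ h1 h2]
      rw [PySem.List.pyGet?_eq_some_getElem _ h1 h3]
      simp [List.getElem_take]
    rw [htake]
    rfl
  unfold fuze_dict_alt
  dsimp only
  rw [hby]

-- ===== VERDICT (by name: the statements are the Claim_ definitions above) =====
theorem fuze_dict_spec : Claim_equal_fuze_dict := by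
  intro list_dict nb_values nb_dict _ _
  unfold Spec_fuze_dict
  rw [pv_A_eq, pv_B_eq]
  exact List.map_congr_left (fun i _ => pv_group _ i (pv_nodup_filtered_js list_dict nb_dict))
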